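-- pv_equiv track=rewrite | github.com/alalapi-0/PrivateTunnel | server/security/redact.py | redact_domain
-- ===== SOURCE A (Python) =====
-- def redact_domain(value: str) -> str:
--     parts = value.split('.')
--     if len(parts) < 2:
--         return value
--     masked = []
--     for index, part in enumerate(parts):
--         if index == len(parts) - 1:
--             masked.append(part)
--         elif index == 0:
--             masked.append(part[:2] + '*' * max(0, len(part) - 2))
--         else:
--             masked.append('*' * len(part))
--     return '.'.join(masked)
-- ===== SOURCE B (Python) =====
-- def _mask_rest(rest: str) -> str:
--     d = rest.find('.')
--     if d == -1:
--         return rest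
--     return '*' * d + '.' + _mask_rest(rest[d + 1:])
--
--
-- def redact_domain(value: str) -> str:
--     first = value.find('.')
--     if first == -1:
--         return value
--     head = value[:first]
--     return head[:2] + '*' * (len(head) - 2) + '.' + _mask_rest(value[first + 1:])
-- ===== Notes on version B (the rewrite author's own statement) =====
-- stated objective: alternative
-- what changed: B never builds the parts list: instead of splitting on the dot separator and running an enumerate loop that decides each label's role by index, it locates the first separator with find, masks the head label in place, and recursively re-partitions the remainder at each next separator (starring the segment before it), returning the separator-free tail verbatim.
import Mathlib
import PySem

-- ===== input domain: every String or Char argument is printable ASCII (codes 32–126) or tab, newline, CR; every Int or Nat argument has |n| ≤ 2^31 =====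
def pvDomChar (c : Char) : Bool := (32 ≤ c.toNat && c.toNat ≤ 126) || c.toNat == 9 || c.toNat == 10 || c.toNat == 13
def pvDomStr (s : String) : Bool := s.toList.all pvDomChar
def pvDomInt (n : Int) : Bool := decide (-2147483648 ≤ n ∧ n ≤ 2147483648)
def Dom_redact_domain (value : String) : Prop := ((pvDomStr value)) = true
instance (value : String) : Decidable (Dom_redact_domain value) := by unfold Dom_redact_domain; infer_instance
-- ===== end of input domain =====

-- B drops split('.')/enumerate entirely: it finds the first dot, masks the head label in place and
-- recursively re-partitions the remainder at each next dot, keeping the dot-free tail; objective: alternative.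

-- ===== PORT A =====
-- ports work on List Char via PySem.Chars (exact); '*' * max(0, len-2) is List.replicate (len-2) '*' (Nat subtraction is exactly max 0)
def redact_domain (value : String) : String :=
  let parts := PySem.Chars.splitOn value.toList ['.']
  if parts.length < 2 then value
  else
    let masked := (PySem.List.enumerate parts 0).foldl
      (fun (acc : List (List Char)) ip =>
        if ip.1 = (parts.length : Int) - 1 then acc ++ [ip.2]
        else if ip.1 = 0 then acc ++ [ip.2.take 2 ++ List.replicate (ip.2.length - 2) '*']
        else acc ++ [List.replicate ip.2.length '*']) []
    String.ofList (PySem.Chars.join ['.'] masked)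

-- ===== PORT B =====
-- termination fact the recursion cites: the slice past the found dot is strictly shorter
theorem maskRest_dec (rest : List Char) (h : ¬ PySem.Chars.find rest ['.'] = -1) :
    (PySem.List.slice rest (some (PySem.Chars.find rest ['.'] + 1)) none).length < rest.length := by
  have h0 : (0:Int) ≤ PySem.Chars.find rest ['.'] := by
    have := PySem.Chars.neg_one_le_find rest ['.']
    omega
  have hsp := PySem.Chars.find_spec h0
  have hlt : (PySem.Chars.find rest ['.']).toNat < rest.length := by
    rcases hsp.1 with ⟨t, ht⟩
    have : (List.drop (PySem.Chars.find rest ['.']).toNat rest).length ≠ 0 := by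
      rw [← ht]; simp
    simp only [List.length_drop] at this
    omega
  rw [PySem.List.slice_from rest (by omega)]
  simp only [List.length_drop]
  omega

def maskRest (rest : List Char) : List Char :=
  if h : PySem.Chars.find rest ['.'] = -1 then rest -- h feeds decreasing_by
  else
    PySem.List.pyRepeat ['*'] (PySem.Chars.find rest ['.']) ++
      '.' :: maskRest (PySem.List.slice rest (some (PySem.Chars.find rest ['.'] + 1)) none)
termination_by rest.length
decreasing_by exact maskRest_dec rest h

def redact_domain_alt (value : String) : String :=
  let s := value.toList
  let first := PySem.Chars.find s ['.']
  if first = -1 then value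
  else
    let head := PySem.List.slice s none (some first)
    String.ofList
      (PySem.List.slice head none (some 2) ++
        PySem.List.pyRepeat ['*'] ((head.length : Int) - 2) ++
        '.' :: maskRest (PySem.List.slice s (some (first + 1)) none))

-- ===== PRECONDITION & SPEC =====
def Spec_redact_domain (value : String) (out : String) : Prop := out = redact_domain_alt value
instance (value : String) (out : String) : Decidable (Spec_redact_domain value out) := by unfold Spec_redact_domain; infer_instance

-- ===== CLAIM (what is proved, stated in full; the proofs are below) =====
def Claim_equal_redact_domain : Prop := ∀ (value : String), Dom_redact_domain value → Spec_redact_domain value (redact_domain value)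

-- ===== LEMMAS AND PROOFS =====

-- simple structural recursion computing str.split('.') (proof-side model of PySem.Chars.splitOn)
def splitRec : List Char → List (List Char)
  | [] => [[]]
  | c :: rest =>
    if c = '.' then [] :: splitRec rest
    else
      match splitRec rest with
      | [] => [[c]]
      | p :: ps => (c :: p) :: ps

theorem splitRec_ne_nil (s : List Char) : splitRec s ≠ [] := by
  cases s with
  | nil => simp [splitRec]
  | cons c rest =>
    simp only [splitRec]
    split_ifs
    · simp
    · cases h : splitRec rest <;> simp

-- accumulate: what splitOn.go computes in terms of splitRec
def consHead (p : List Char) : List (List Char) → List (List Char)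
  | [] => [p]
  | q :: qs => (p ++ q) :: qs

theorem go_spec (l : List Char) :
    ∀ (fuel : Nat) (cur : List Char) (acc : List (List Char)), l.length ≤ fuel →
    PySem.Chars.splitOn.go ['.'] fuel l cur acc = acc.reverse ++ consHead cur.reverse (splitRec l) := by
  induction l with
  | nil =>
    intro fuel cur acc _
    cases fuel <;> simp [PySem.Chars.splitOn.go, splitRec, consHead]
  | cons c rest ih =>
    intro fuel cur acc hf
    cases fuel with
    | zero => simp at hf
    | succ f =>
      simp only [PySem.Chars.splitOn.go]
      by_cases hc : c = '.'
      · rw [if_pos (by simp [List.isPrefixOf, hc])]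
        have hdrop : List.drop (['.'] : List Char).length (c :: rest) = rest := by simp
        rw [hdrop, ih f [] (cur.reverse :: acc) (by simp at hf; omega)]
        have hne := splitRec_ne_nil rest
        cases hsr : splitRec rest with
        | nil => exact absurd hsr hne
        | cons p ps => simp [splitRec, hc, hsr, consHead]
      · rw [if_neg (by simp [List.isPrefixOf]; exact fun h => hc h.symm)]
        rw [ih f (c :: cur) acc (by simp at hf; omega)]
        have hne := splitRec_ne_nil rest
        cases hsr : splitRec rest with
        | nil => exact absurd hsr hne
        | cons p ps => simp [splitRec, hc, hsr, consHead]

theorem splitOn_eq_splitRec (s : List Char) : PySem.Chars.splitOn s ['.'] = splitRec s := by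
  have := go_spec s (s.length + 1) [] [] (by omega)
  rw [PySem.Chars.splitOn, this]
  have hne := splitRec_ne_nil s
  cases hsr : splitRec s with
  | nil => exact absurd hsr hne
  | cons p ps => simp [consHead]

theorem join_splitRec (s : List Char) : PySem.Chars.join ['.'] (splitRec s) = s := by
  induction s with
  | nil => simp [splitRec, PySem.Chars.join_singleton]
  | cons c rest ih =>
    simp only [splitRec]
    by_cases hc : c = '.'
    · rw [if_pos hc]
      have hne := splitRec_ne_nil rest
      cases hsr : splitRec rest with
      | nil => exact absurd hsr hne
      | cons p ps =>
        rw [hsr] at ih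
        rw [PySem.Chars.join_cons_cons, ih, hc]
        simp
    · rw [if_neg hc]
      have hne := splitRec_ne_nil rest
      cases hsr : splitRec rest with
      | nil => exact absurd hsr hne
      | cons p ps =>
        rw [hsr] at ih
        cases ps with
        | nil => rw [PySem.Chars.join_singleton] at ih ⊢; simp [ih]
        | cons q qs =>
          rw [PySem.Chars.join_cons_cons] at ih ⊢
          simp [← ih]

theorem splitRec_no_dot (s : List Char) : ∀ p ∈ splitRec s, '.' ∉ p := by
  induction s with
  | nil => simp [splitRec]
  | cons c rest ih =>
    simp only [splitRec]
    by_cases hc : c = '.'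
    · rw [if_pos hc]
      intro p hp
      rcases List.mem_cons.1 hp with rfl | hp
      · simp
      · exact ih p hp
    · rw [if_neg hc]
      have hne := splitRec_ne_nil rest
      cases hsr : splitRec rest with
      | nil => exact absurd hsr hne
      | cons q qs =>
        intro p hp
        rcases List.mem_cons.1 hp with rfl | hp
        · intro hm
          rcases List.mem_cons.1 hm with h' | h'
          · exact hc h'.symm
          · exact ih q (by rw [hsr]; exact List.mem_cons_self) h'
        · exact ih p (by rw [hsr]; exact List.mem_cons.2 (Or.inr hp))

theorem splitRec_eq_singleton (s : List Char) (h : '.' ∉ s) : splitRec s = [s] := by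
  induction s with
  | nil => simp [splitRec]
  | cons c rest ih =>
    simp only [splitRec]
    have hc : ¬ c = '.' := fun hc => h (by simp [hc])
    rw [if_neg hc, ih (fun hm => h (by simp [hm]))]

theorem splitRec_two_le (s : List Char) (h : '.' ∈ s) : 2 ≤ (splitRec s).length := by
  induction s with
  | nil => simp at h
  | cons c rest ih =>
    simp only [splitRec]
    by_cases hc : c = '.'
    · rw [if_pos hc]
      have := splitRec_ne_nil rest
      cases hsr : splitRec rest with
      | nil => exact absurd hsr this
      | cons p ps => simp
    · rw [if_neg hc]
      have hr : '.' ∈ rest := by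
        rcases List.mem_cons.1 h with h' | h'
        · exact absurd h'.symm hc
        · exact h'
      have := ih hr
      cases hsr : splitRec rest with
      | nil => exact absurd hsr (splitRec_ne_nil rest)
      | cons p ps => rw [hsr] at this; simpa using this

-- '.'-free prefix followed by a dot: find lands exactly on the dot
theorem find_dot_of_split (p t : List Char) (hp : '.' ∉ p) :
    PySem.Chars.find (p ++ '.' :: t) ['.'] = (p.length : Int) := by
  have hin : (['.'] : List Char) <:+: p ++ '.' :: t := ⟨p, t, by simp⟩
  have h0 : (0:Int) ≤ PySem.Chars.find (p ++ '.' :: t) ['.'] :=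
    (PySem.Chars.find_nonneg_iff _ _).2 hin
  have hsp := PySem.Chars.find_spec h0
  set k := (PySem.Chars.find (p ++ '.' :: t) ['.']).toNat with hk
  have hle : k ≤ p.length := by
    by_contra hgt
    exact hsp.2 p.length (by omega) (by rw [List.drop_left]; exact ⟨t, rfl⟩)
  have hge : ¬ k < p.length := by
    intro hlt
    have hdk : List.drop k (p ++ '.' :: t) = List.drop k p ++ '.' :: t :=
      List.drop_append_of_le_length (by omega)
    rcases hsp.1 with ⟨u, hu⟩
    rw [hdk] at hu
    cases hdp : List.drop k p with
    | nil => have := congrArg List.length hdp; simp at this; omega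
    | cons a as =>
      rw [hdp] at hu
      have ha : a = '.' := by
        have := congrArg (fun l => l[0]?) hu
        simpa using this.symm
      exact hp (by rw [← ha]; exact List.mem_of_mem_drop (hdp ▸ List.mem_cons_self))
  have : k = p.length := by omega
  omega

theorem find_eq_neg_one_of_no_dot (s : List Char) (h : '.' ∉ s) :
    PySem.Chars.find s ['.'] = -1 := by
  rw [PySem.Chars.find_eq_neg_one_iff]
  intro hin
  rcases hin with ⟨u, v, huv⟩
  exact h (by rw [← huv]; simp)

theorem maskRest_join (parts : List (List Char)) (p : List Char) :
    (∀ q ∈ p :: parts, '.' ∉ q) →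
    maskRest (PySem.Chars.join ['.'] (p :: parts)) =
      PySem.Chars.join ['.']
        ((p :: parts).dropLast.map (fun q => List.replicate q.length '*') ++ [(p :: parts).getLastD []]) := by
  induction parts generalizing p with
  | nil =>
    intro hnd
    rw [PySem.Chars.join_singleton, maskRest,
      dif_pos (find_eq_neg_one_of_no_dot p (hnd p (by simp)))]
    simp [PySem.Chars.join_singleton]
  | cons q qs ih =>
    intro hnd
    have hjoin : PySem.Chars.join ['.'] (p :: q :: qs) = p ++ '.' :: PySem.Chars.join ['.'] (q :: qs) := by
      rw [PySem.Chars.join_cons_cons]; simp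
    have hfind : PySem.Chars.find (PySem.Chars.join ['.'] (p :: q :: qs)) ['.'] = (p.length : Int) := by
      rw [hjoin]; exact find_dot_of_split p _ (hnd p (by simp))
    rw [maskRest, dif_neg (by rw [hfind]; omega), hfind, PySem.List.pyRepeat_singleton,
      PySem.List.slice_from _ (by omega)]
    have hdrop : List.drop ((p.length : Int) + 1).toNat (PySem.Chars.join ['.'] (p :: q :: qs))
        = PySem.Chars.join ['.'] (q :: qs) := by
      rw [hjoin]
      have h1 : ((p.length : Int) + 1).toNat = (p ++ ['.']).length := by simp
      have h2 : p ++ '.' :: PySem.Chars.join ['.'] (q :: qs)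
          = (p ++ ['.']) ++ PySem.Chars.join ['.'] (q :: qs) := by simp
      rw [h1, h2, List.drop_left]
    rw [hdrop, ih q (fun r hr => hnd r (List.mem_cons.2 (Or.inr hr)))]
    have htn : ((p.length : Int)).toNat = p.length := by omega
    rw [htn]
    cases hX : (q :: qs).dropLast.map (fun q => List.replicate q.length '*')
        ++ [(q :: qs).getLastD []] with
    | nil => simp at hX
    | cons y ys =>
      rw [List.getLastD_cons] at hX
      rw [List.dropLast_cons₂, List.map_cons, List.getLastD_cons, List.getLastD_cons, List.cons_append, hX,
        PySem.Chars.join_cons_cons]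
      simp

-- A's fold over enumerate(parts), decomposed positionally
theorem masked_eq (p0 l : List Char) (mid : List (List Char)) :
    (PySem.List.enumerate (p0 :: (mid ++ [l])) 0).foldl
      (fun (acc : List (List Char)) ip =>
        if ip.1 = ((p0 :: (mid ++ [l])).length : Int) - 1 then acc ++ [ip.2]
        else if ip.1 = 0 then acc ++ [ip.2.take 2 ++ List.replicate (ip.2.length - 2) '*']
        else acc ++ [List.replicate ip.2.length '*']) []
    = (p0.take 2 ++ List.replicate (p0.length - 2) '*')
        :: (mid.map (fun q => List.replicate q.length '*') ++ [l]) := by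
  set g : Int × List Char → List Char := fun ip =>
    if ip.1 = ((p0 :: (mid ++ [l])).length : Int) - 1 then ip.2
    else if ip.1 = 0 then ip.2.take 2 ++ List.replicate (ip.2.length - 2) '*'
    else List.replicate ip.2.length '*' with hg
  have hfold : (fun (acc : List (List Char)) ip =>
        if ip.1 = ((p0 :: (mid ++ [l])).length : Int) - 1 then acc ++ [ip.2]
        else if ip.1 = 0 then acc ++ [ip.2.take 2 ++ List.replicate (ip.2.length - 2) '*']
        else acc ++ [List.replicate ip.2.length '*'])
      = fun acc ip => acc ++ [g ip] := by
    funext acc ip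
    simp only [hg]
    split_ifs <;> rfl
  rw [hfold, PySem.List.foldl_append_singleton_eq_map g _ []]
  have hen : PySem.List.enumerate (p0 :: (mid ++ [l])) 0
      = (0, p0) :: (PySem.List.enumerate mid 1 ++ [((1 + mid.length : Int), l)]) := by
    rw [PySem.List.enumerate_cons, PySem.List.enumerate_append]
    simp [PySem.List.enumerate_cons]
  rw [hen]
  have hg0 : g (0, p0) = p0.take 2 ++ List.replicate (p0.length - 2) '*' := by
    simp only [hg]
    rw [if_neg (by intro hc; simp at hc; omega)]
    simp
  have hgl : g ((1 + mid.length : Int), l) = l := by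
    simp only [hg]
    rw [if_pos (by simp; omega)]
  have hmid : (PySem.List.enumerate mid 1).map g
      = mid.map (fun q => List.replicate q.length '*') := by
    have hc : (PySem.List.enumerate mid 1).map g
        = (PySem.List.enumerate mid 1).map
            ((fun q : List Char => List.replicate q.length '*') ∘ Prod.snd) := by
      apply List.map_congr_left
      intro ip hip
      obtain ⟨k, hk, rfl⟩ := (PySem.List.mem_enumerate_iff _ _ _).1 hip
      simp only [hg]
      rw [if_neg (by intro hc; simp at hc; omega), if_neg (by intro hc; omega)]
      rfl
    rw [hc, ← List.map_map, PySem.List.map_snd_enumerate]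
  simp only [List.map_cons, List.map_append, List.map_nil, hg0, hgl, hmid]
  rfl

-- ===== VERDICT (by name: the statement is the Claim_ definition above) =====
theorem main_eq (value : String) : redact_domain value = redact_domain_alt value := by
  unfold redact_domain redact_domain_alt
  simp only [splitOn_eq_splitRec]
  by_cases hd : '.' ∈ value.toList
  · -- at least one dot: both mask
    have h2 := splitRec_two_le _ hd
    obtain ⟨p0, rest, hsr⟩ : ∃ p0 rest, splitRec value.toList = p0 :: rest := by
      cases h : splitRec value.toList with
      | nil => exact absurd h (splitRec_ne_nil _)
      | cons a t => exact ⟨a, t, rfl⟩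
    obtain ⟨mid, l, hrest⟩ : ∃ mid l, rest = mid ++ [l] := by
      rcases List.eq_nil_or_concat rest with h' | ⟨mid, l, hc⟩
      · rw [hsr, h'] at h2; simp at h2
      · exact ⟨mid, l, by simpa using hc⟩
    rw [hrest] at hsr
    have hnd := splitRec_no_dot value.toList
    rw [hsr] at hnd
    have hs : value.toList = PySem.Chars.join ['.'] (p0 :: (mid ++ [l])) := by
      rw [← hsr, join_splitRec]
    obtain ⟨y, ys, hyl⟩ : ∃ y ys, mid ++ [l] = y :: ys := by
      cases h : mid ++ [l] with
      | nil => simp at h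
      | cons a t => exact ⟨a, t, rfl⟩
    have hjoin : PySem.Chars.join ['.'] (p0 :: (mid ++ [l]))
        = p0 ++ '.' :: PySem.Chars.join ['.'] (mid ++ [l]) := by
      rw [hyl, PySem.Chars.join_cons_cons]; simp
    have hfind : PySem.Chars.find value.toList ['.'] = (p0.length : Int) := by
      rw [hs, hjoin]
      exact find_dot_of_split p0 _ (hnd p0 (by simp))
    -- A side
    rw [hsr, if_neg (by simp), masked_eq]
    -- B side
    rw [hfind, if_neg (by omega)]
    rw [PySem.List.slice_to _ (by omega : (0:Int) ≤ p0.length)]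
    have htake : List.take ((p0.length : Int)).toNat value.toList = p0 := by
      have : ((p0.length : Int)).toNat = p0.length := by omega
      rw [this, hs, hjoin]
      exact List.take_left
    rw [htake, PySem.List.slice_to _ (by omega : (0:Int) ≤ 2),
      PySem.List.slice_from _ (by omega : (0:Int) ≤ (p0.length : Int) + 1),
      PySem.List.pyRepeat_singleton]
    have hrep : ((p0.length : Int) - 2).toNat = p0.length - 2 := by omega
    have h2n : ((2:Int)).toNat = 2 := by omega
    have hdrop : List.drop ((p0.length : Int) + 1).toNat value.toList
        = PySem.Chars.join ['.'] (mid ++ [l]) := by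
      rw [hs, hjoin]
      have h1 : ((p0.length : Int) + 1).toNat = (p0 ++ ['.']).length := by simp
      have h2' : p0 ++ '.' :: PySem.Chars.join ['.'] (mid ++ [l])
          = (p0 ++ ['.']) ++ PySem.Chars.join ['.'] (mid ++ [l]) := by simp
      rw [h1, h2', List.drop_left]
    rw [hrep, h2n, hdrop, hyl, maskRest_join ys y (by rw [← hyl]; intro q hq; exact hnd q (List.mem_cons.2 (Or.inr hq))), ← hyl,
      List.dropLast_concat, List.getLastD_concat]
    -- both sides are now joins of the same decomposed list
    obtain ⟨z, zs, hz⟩ : ∃ z zs, mid.map (fun q => List.replicate q.length '*') ++ [l] = z :: zs := by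
      cases h : mid.map (fun q => List.replicate q.length '*') ++ [l] with
      | nil => simp at h
      | cons a t => exact ⟨a, t, rfl⟩
    rw [← List.cons_append, List.cons_append, hz, PySem.Chars.join_cons_cons]
    simp
  · -- no dot: both return the input unchanged
    rw [splitRec_eq_singleton _ hd, find_eq_neg_one_of_no_dot _ hd]
    simp

-- ===== VERDICT (by name: the statement is the Claim_ definition above) =====
theorem redact_domain_spec : Claim_equal_redact_domain := by
  intro value _
  exact main_eq value
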